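-- pv_equiv track=rewrite | github.com/BoChao1Zhang/monetGPT | agent/context_folding.py | _get_ancestor_chain
-- ===== SOURCE A (Python) =====
-- from typing import List
--
-- def _get_ancestor_chain(
--     asset_graph: List[dict],
--     target_uri: str,
-- ) -> List[dict]:
--     """Walk backwards from target_uri to the root (original image)."""
--     if not asset_graph:
--         return []
--
--     # Build uri → node lookup
--     by_uri = {}
--     for node in asset_graph:
--         uri = node.get("uri", "")
--         if uri:
--             by_uri[uri] = node
--
--     if not target_uri:
--         # Keep only original + latest when current target is missing.
--         if len(asset_graph) <= 2:
--             return list(asset_graph)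
--         return [asset_graph[0], asset_graph[-1]]
--
--     if target_uri not in by_uri:
--         if len(asset_graph) <= 2:
--             return list(asset_graph)
--         return [asset_graph[0], asset_graph[-1]]
--
--     chain = []
--     current = target_uri
--     visited = set()
--
--     while current and current in by_uri and current not in visited:
--         visited.add(current)
--         node = by_uri[current]
--         chain.append(node)
--         current = node.get("parent_uri", "")
--
--     chain.reverse()
--     return chain
-- ===== SOURCE B (Python) =====
-- from typing import List
--
--
-- def _get_ancestor_chain(
--     asset_graph: List[dict],
--     target_uri: str,
-- ) -> List[dict]:
--     """Walk backwards from target_uri to the root (original image)."""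
--     if not asset_graph:
--         return []
--
--     lookup = {n["uri"]: n for n in asset_graph if n.get("uri")}
--
--     def chain_from(uri, seen):
--         node = lookup.get(uri)
--         if node is None or uri in seen:
--             return []
--         return chain_from(node.get("parent_uri", ""), seen | {uri}) + [node]
--
--     chain = chain_from(target_uri, frozenset())
--     if chain:
--         return chain
--     if len(asset_graph) <= 2:
--         return list(asset_graph)
--     return [asset_graph[0], asset_graph[-1]]
-- ===== Notes on version B (the rewrite author's own statement) =====
-- stated objective: simpler
-- what changed: B replaces A's iterative while-loop (append to a chain, mutate a visited set, membership pre-checks, final reverse) by a recursive chain_from function that returns the root-first chain directly (recursion + [node], immutable seen set) and collapses A's two fallback branches into one 'chain is empty' test; the lookup dict is built with a comprehension.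
import Mathlib
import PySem

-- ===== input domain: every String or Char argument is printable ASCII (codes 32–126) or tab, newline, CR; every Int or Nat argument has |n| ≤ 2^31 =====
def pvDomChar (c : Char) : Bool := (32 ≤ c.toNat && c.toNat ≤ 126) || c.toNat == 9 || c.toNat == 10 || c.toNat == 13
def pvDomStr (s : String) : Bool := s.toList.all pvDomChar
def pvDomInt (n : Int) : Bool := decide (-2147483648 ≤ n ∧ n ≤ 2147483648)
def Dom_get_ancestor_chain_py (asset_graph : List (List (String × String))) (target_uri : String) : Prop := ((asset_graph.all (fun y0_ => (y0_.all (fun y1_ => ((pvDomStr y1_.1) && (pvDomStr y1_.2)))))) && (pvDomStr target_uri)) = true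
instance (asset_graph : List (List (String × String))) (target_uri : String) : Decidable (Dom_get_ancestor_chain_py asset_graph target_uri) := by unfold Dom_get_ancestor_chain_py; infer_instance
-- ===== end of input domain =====

-- B rebuilds the chain recursively root-first (no reverse, no mutable visited set) and merges
-- A's two fallback branches into one "empty chain" test; objective: simpler (no speed claim).

-- node.get(key, "") on one node (a Python dict)
def nodeGet (node : List (String × String)) (key : String) : String :=
  PySem.Dict.getD ⟨node⟩ key ""

-- ===== PORT A =====
-- by_uri = {}; for node in asset_graph: uri = node.get("uri",""); if uri: by_uri[uri] = node
def buildByUri (asset_graph : List (List (String × String))) :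
    PySem.Dict String (List (String × String)) :=
  asset_graph.foldl
    (fun d node =>
      let uri := nodeGet node "uri"
      if uri ≠ "" then d.insert uri node else d)
    PySem.Dict.empty

-- the while loop of A: state (chain, visited, current); fuel ≥ #iterations, guard order as in Python
def loopA (d : PySem.Dict String (List (String × String)))
    (chain : List (List (String × String))) (visited : PySem.Set String)
    (current : String) : Nat → List (List (String × String))
  | 0 => chain
  | fuel + 1 =>
    if current = "" then chain
    else
      match d.get? current with
      | none => chain
      | some node =>
        if PySem.Set.contains visited current then chain
        else loopA d (chain ++ [node]) (PySem.Set.add visited current)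
              (nodeGet node "parent_uri") fuel

def get_ancestor_chain_py (asset_graph : List (List (String × String))) (target_uri : String) : List (List (String × String)) :=
  if asset_graph = [] then []
  else
    let by_uri := buildByUri asset_graph
    if target_uri = "" then
      if asset_graph.length ≤ 2 then asset_graph
      else [(PySem.List.pyGet? asset_graph 0).getD [], (PySem.List.pyGet? asset_graph (-1)).getD []]
    else if by_uri.contains target_uri = false then
      if asset_graph.length ≤ 2 then asset_graph
      else [(PySem.List.pyGet? asset_graph 0).getD [], (PySem.List.pyGet? asset_graph (-1)).getD []]
    else
      (loopA by_uri [] PySem.Set.empty target_uri (asset_graph.length + 1)).reverse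

-- ===== PORT B =====
-- lookup = {n["uri"]: n for n in asset_graph if n.get("uri")}
def buildLookup (asset_graph : List (List (String × String))) :
    PySem.Dict String (List (String × String)) :=
  (asset_graph.filter (fun n => nodeGet n "uri" ≠ "")).foldl
    (fun d n => d.insert (nodeGet n "uri") n) PySem.Dict.empty

-- chain_from(uri, seen): recursion + [node]; fuel bounds the recursion depth (seen grows each step)
def chainFrom (lookup : PySem.Dict String (List (String × String)))
    (uri : String) (seen : PySem.Set String) : Nat → List (List (String × String))
  | 0 => []
  | fuel + 1 =>
    match lookup.get? uri with
    | none => []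
    | some node =>
      if PySem.Set.contains seen uri then []
      else chainFrom lookup (nodeGet node "parent_uri") (PySem.Set.add seen uri) fuel ++ [node]

def get_ancestor_chain_py_alt (asset_graph : List (List (String × String))) (target_uri : String) : List (List (String × String)) :=
  if asset_graph = [] then []
  else
    let lookup := buildLookup asset_graph
    let chain := chainFrom lookup target_uri PySem.Set.empty (asset_graph.length + 1)
    if chain ≠ [] then chain
    else if asset_graph.length ≤ 2 then asset_graph
    else [(PySem.List.pyGet? asset_graph 0).getD [], (PySem.List.pyGet? asset_graph (-1)).getD []]

-- ===== PRECONDITION & SPEC =====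
def Spec_get_ancestor_chain_py (asset_graph : List (List (String × String))) (target_uri : String) (out : List (List (String × String))) : Prop := out = get_ancestor_chain_py_alt asset_graph target_uri
instance (asset_graph : List (List (String × String))) (target_uri : String) (out : List (List (String × String))) : Decidable (Spec_get_ancestor_chain_py asset_graph target_uri out) := by unfold Spec_get_ancestor_chain_py; infer_instance

-- ===== CLAIM =====
def Claim_equal_get_ancestor_chain_py : Prop := ∀ (asset_graph : List (List (String × String))) (target_uri : String), Dom_get_ancestor_chain_py asset_graph target_uri → Spec_get_ancestor_chain_py asset_graph target_uri (get_ancestor_chain_py asset_graph target_uri)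

-- ===== LEMMAS AND PROOFS =====

theorem buildByUri_append (xs : List (List (String × String))) (x : List (String × String)) :
    buildByUri (xs ++ [x]) =
      (if nodeGet x "uri" ≠ "" then (buildByUri xs).insert (nodeGet x "uri") x else buildByUri xs) := by
  simp [buildByUri, List.foldl_append]

-- the dict never holds the empty key
theorem get?_buildByUri_empty (xs : List (List (String × String))) :
    (buildByUri xs).get? "" = none := by
  induction xs using List.reverseRecOn with
  | nil => simp [buildByUri, PySem.Dict.get?_empty]
  | append_singleton xs x ih =>
    rw [buildByUri_append]
    split_ifs with h
    · rw [PySem.Dict.get?_insert, if_neg (fun he => h he.symm)]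
      exact ih
    · exact ih

-- B's comprehension builds the very same dict value as A's conditional-insert loop
theorem buildLookup_eq (xs : List (List (String × String))) :
    buildLookup xs = buildByUri xs := by
  unfold buildLookup buildByUri
  generalize (PySem.Dict.empty : PySem.Dict String (List (String × String))) = d
  induction xs generalizing d with
  | nil => rfl
  | cons x xs ih =>
    by_cases h : nodeGet x "uri" = ""
    · simp only [List.filter_cons, List.foldl_cons, h, ne_eq, not_true_eq_false,
        decide_false, Bool.false_eq_true, if_false]
      exact ih _
    · simp only [List.filter_cons, List.foldl_cons, ne_eq, h, not_false_eq_true,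
        decide_true, if_true]
      exact ih _

-- A's loop is B's recursion with the accumulated chain in front, reversed
theorem loopA_eq_chainFrom (xs : List (List (String × String))) (fuel : Nat) :
    ∀ (chain : List (List (String × String))) (v : PySem.Set String) (cur : String),
      loopA (buildByUri xs) chain v cur fuel =
        chain ++ (chainFrom (buildByUri xs) cur v fuel).reverse := by
  induction fuel with
  | zero => intro chain v cur; simp [loopA, chainFrom]
  | succ f ih =>
    intro chain v cur
    simp only [loopA, chainFrom]
    by_cases hc : cur = ""
    · subst hc
      rw [get?_buildByUri_empty, if_pos rfl]
      simp
    · rw [if_neg hc]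
      cases h : (buildByUri xs).get? cur with
      | none => simp
      | some node =>
        dsimp only
        split_ifs with hv
        · simp
        · rw [ih (chain ++ [node])]
          simp

-- ===== VERDICT =====
theorem get_ancestor_chain_py_spec : Claim_equal_get_ancestor_chain_py := by
  intro asset_graph target_uri _
  unfold Spec_get_ancestor_chain_py get_ancestor_chain_py get_ancestor_chain_py_alt
  by_cases hnil : asset_graph = []
  · simp [hnil]
  · rw [if_neg hnil, if_neg hnil]
    simp only [buildLookup_eq]
    by_cases ht : target_uri = ""
    · subst ht
      have hch : chainFrom (buildByUri asset_graph) "" PySem.Set.empty (asset_graph.length + 1) = [] := by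
        simp [chainFrom, get?_buildByUri_empty]
      rw [if_pos rfl, hch]
      simp
    · rw [if_neg ht]
      cases h : (buildByUri asset_graph).get? target_uri with
      | none =>
        have hco : (buildByUri asset_graph).contains target_uri = false := by
          rw [PySem.Dict.contains_eq_isSome_get?, h]; rfl
        have hch : chainFrom (buildByUri asset_graph) target_uri PySem.Set.empty (asset_graph.length + 1) = [] := by
          simp [chainFrom, h]
        rw [if_pos hco, hch]
        simp
      | some node =>
        have hco : (buildByUri asset_graph).contains target_uri = true := by
          rw [PySem.Dict.contains_eq_isSome_get?, h]; rfl
        rw [hco]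
        simp only [Bool.true_eq_false, if_false]
        have hch : chainFrom (buildByUri asset_graph) target_uri PySem.Set.empty (asset_graph.length + 1) =
            chainFrom (buildByUri asset_graph) (nodeGet node "parent_uri")
              (PySem.Set.add PySem.Set.empty target_uri) asset_graph.length ++ [node] := by
          simp [chainFrom, h, PySem.Set.contains, PySem.Set.empty]
        rw [loopA_eq_chainFrom, hch]
        simp
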